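-- pv_equiv track=rewrite | github.com/chihiroyoshikawa-png/pokecard | server.py | resolve_style
-- ===== SOURCE A (Python) =====
-- VIBE_STYLE = {
--     "fuwafuwa": "soft_cute",
--     "nikoniko": "soft_cute",
--     "pokapoka": "soft_cute",
--     "tekipaki": "energetic_cute",
--     "kirakira": "energetic_cute",
--     "wakuwaku": "energetic_cute",
--     "kiri": "cool",
--     "shu": "cool",
--     "meramera": "cool",
-- }
--
-- STYLE_PROMPTS = {
--     "soft_cute": {
--         "tone": "A soft, round, and gentle",
--         "design": "rounded body shape with stubby limbs, simple small dot eyes or half-closed relaxed eyes, "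
--                   "no eyelashes or sparkle highlights, calm neutral expression, "
--                   "one deliberate quirky feature like an oversized tail or asymmetric ear",
--     },
--     "energetic_cute": {
--         "tone": "A lively and energetic",
--         "design": "dynamic pose, simple round eyes with small pupils, wide open-mouth grin, "
--                   "compact athletic body, no sparkle effects or star highlights in eyes, "
--                   "one playful asymmetric feature like a crooked fang or uneven markings",
--     },
--     "cool": {
--         "tone": "A fierce, sleek, and powerful",
--         "design": "sharp angular body shape, narrow eyes with simple slit pupils, "
--                   "streamlined muscular body, confident stance, "
--                   "spiky or flowing natural body features like fins or crests, "
--                   "bold contrasting colors with dark accents",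
--     },
-- }
--
-- def resolve_style(vibes):
--     """選択されたバイブからビジュアルスタイルを決定する"""
--     if not vibes:
--         return STYLE_PROMPTS["energetic_cute"]  # デフォルト
--
--     # 各バイブのカテゴリをカウント
--     category_counts = {}
--     for v in vibes:
--         cat = VIBE_STYLE.get(v, "energetic_cute")
--         category_counts[cat] = category_counts.get(cat, 0) + 1
--
--     # 最多カテゴリを採用（同数ならmixed処理）
--     sorted_cats = sorted(category_counts.items(), key=lambda x: -x[1])
--
--     if len(sorted_cats) == 1 or sorted_cats[0][1] > sorted_cats[1][1]:
--         return STYLE_PROMPTS[sorted_cats[0][0]]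
--
--     # 2カテゴリが同数（1つずつ選んだ場合）→ ブレンド
--     cat_a, cat_b = sorted_cats[0][0], sorted_cats[1][0]
--     a, b = STYLE_PROMPTS[cat_a], STYLE_PROMPTS[cat_b]
--     return {
--         "tone": f"{a['tone'].rstrip(',')} yet {b['tone'].lower().lstrip('a ')}",
--         "design": f"{a['design']}, blended with {b['design']}",
--     }
-- ===== SOURCE B (Python) =====
-- VIBE_STYLE = {
--     "fuwafuwa": "soft_cute",
--     "nikoniko": "soft_cute",
--     "pokapoka": "soft_cute",
--     "tekipaki": "energetic_cute",
--     "kirakira": "energetic_cute",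
--     "wakuwaku": "energetic_cute",
--     "kiri": "cool",
--     "shu": "cool",
--     "meramera": "cool",
-- }
--
-- STYLE_PROMPTS = {
--     "soft_cute": {
--         "tone": "A soft, round, and gentle",
--         "design": "rounded body shape with stubby limbs, simple small dot eyes or half-closed relaxed eyes, "
--                   "no eyelashes or sparkle highlights, calm neutral expression, "
--                   "one deliberate quirky feature like an oversized tail or asymmetric ear",
--     },
--     "energetic_cute": {
--         "tone": "A lively and energetic",
--         "design": "dynamic pose, simple round eyes with small pupils, wide open-mouth grin, "
--                   "compact athletic body, no sparkle effects or star highlights in eyes, "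
--                   "one playful asymmetric feature like a crooked fang or uneven markings",
--     },
--     "cool": {
--         "tone": "A fierce, sleek, and powerful",
--         "design": "sharp angular body shape, narrow eyes with simple slit pupils, "
--                   "streamlined muscular body, confident stance, "
--                   "spiky or flowing natural body features like fins or crests, "
--                   "bold contrasting colors with dark accents",
--     },
-- }
--
--
-- def _blend(cat_a, cat_b):
--     a, b = STYLE_PROMPTS[cat_a], STYLE_PROMPTS[cat_b]
--     return {
--         "tone": f"{a['tone'].rstrip(',')} yet {b['tone'].lower().lstrip('a ')}",
--         "design": f"{a['design']}, blended with {b['design']}",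
--     }
--
--
-- def resolve_style(vibes):
--     """選択されたバイブからビジュアルスタイルを決定する"""
--     if not vibes:
--         return STYLE_PROMPTS["energetic_cute"]
--
--     # category of each vibe, then the distinct categories in first-occurrence order
--     cats = [VIBE_STYLE.get(v, "energetic_cute") for v in vibes]
--     order = list(dict.fromkeys(cats))
--
--     # the categories hitting the maximal count, in first-occurrence order
--     m = max(cats.count(c) for c in order)
--     top = [c for c in order if cats.count(c) == m]
--
--     if len(top) == 1:
--         return STYLE_PROMPTS[top[0]]
--     return _blend(top[0], top[1])
-- ===== Notes on version B (the rewrite author's own statement) =====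
-- stated objective: simpler
-- what changed: B replaces A's stable descending sort of the count dict (plus top-two inspection) by computing the maximal count once and filtering the categories that reach it in first-occurrence order; the counting pass stays, the dict disappears in favour of list count over the mapped category list.
import Mathlib
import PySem

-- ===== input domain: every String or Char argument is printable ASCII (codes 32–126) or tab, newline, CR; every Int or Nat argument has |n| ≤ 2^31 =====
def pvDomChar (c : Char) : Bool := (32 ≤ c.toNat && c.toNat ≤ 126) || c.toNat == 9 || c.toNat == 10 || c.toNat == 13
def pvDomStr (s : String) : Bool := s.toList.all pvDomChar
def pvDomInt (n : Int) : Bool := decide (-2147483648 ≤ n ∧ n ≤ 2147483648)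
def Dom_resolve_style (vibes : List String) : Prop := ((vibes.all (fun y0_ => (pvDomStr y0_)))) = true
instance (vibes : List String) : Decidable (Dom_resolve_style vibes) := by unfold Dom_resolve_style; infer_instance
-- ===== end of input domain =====

-- B replaces A's sort of the count dict by a max-count filter over the categories in
-- first-occurrence order (objective: simpler; no speed claim).

-- ===== PORT A =====
-- module-level constants of server.py, shared by both ports
def VIBE_STYLE : PySem.Dict String String := PySem.Dict.ofList
  [("fuwafuwa", "soft_cute"), ("nikoniko", "soft_cute"), ("pokapoka", "soft_cute"),
   ("tekipaki", "energetic_cute"), ("kirakira", "energetic_cute"), ("wakuwaku", "energetic_cute"),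
   ("kiri", "cool"), ("shu", "cool"), ("meramera", "cool")]

def STYLE_PROMPTS : PySem.Dict String (PySem.Dict String String) := PySem.Dict.ofList
  [("soft_cute", PySem.Dict.ofList
     [("tone", "A soft, round, and gentle"),
      ("design", "rounded body shape with stubby limbs, simple small dot eyes or half-closed relaxed eyes, no eyelashes or sparkle highlights, calm neutral expression, one deliberate quirky feature like an oversized tail or asymmetric ear")]),
   ("energetic_cute", PySem.Dict.ofList
     [("tone", "A lively and energetic"),
      ("design", "dynamic pose, simple round eyes with small pupils, wide open-mouth grin, compact athletic body, no sparkle effects or star highlights in eyes, one playful asymmetric feature like a crooked fang or uneven markings")]),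
   ("cool", PySem.Dict.ofList
     [("tone", "A fierce, sleek, and powerful"),
      ("design", "sharp angular body shape, narrow eyes with simple slit pupils, streamlined muscular body, confident stance, spiky or flowing natural body features like fins or crests, bold contrasting colors with dark accents")])]

-- exact hand ports of Python's str.rstrip(chars) / str.lstrip(chars): strip the maximal run of
-- characters occurring in `chars` from the right / left end (exact for every string)
def pyRstripChars (s chars : String) : String :=
  String.ofList ((s.toList.reverse.dropWhile (fun c => chars.toList.contains c)).reverse)
def pyLstripChars (s chars : String) : String :=
  String.ofList (s.toList.dropWhile (fun c => chars.toList.contains c))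

-- dict lookups STYLE_PROMPTS[...] / a["tone"] / a["design"] always hit an existing key
-- (the keys are the three fixed categories resp. the literal "tone"/"design"), so getD's
-- default is never used and the port is exact.
def resolve_style (vibes : List String) : List (String × String) :=
  if vibes = [] then (STYLE_PROMPTS.getD "energetic_cute" PySem.Dict.empty).items
  else
    let category_counts := vibes.foldl (fun d v =>
      let cat := VIBE_STYLE.getD v "energetic_cute"
      d.insert cat (d.getD cat 0 + 1)) PySem.Dict.empty
    let sorted_cats := PySem.List.sorted category_counts.items (fun x => -x.2) false
    match sorted_cats with
    | [] => []   -- unreachable: vibes ≠ [] makes the dict nonempty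
    | [(c0, _)] => (STYLE_PROMPTS.getD c0 PySem.Dict.empty).items
    | (c0, n0) :: (c1, n1) :: _ =>
      if n0 > n1 then (STYLE_PROMPTS.getD c0 PySem.Dict.empty).items
      else
        let a := STYLE_PROMPTS.getD c0 PySem.Dict.empty
        let b := STYLE_PROMPTS.getD c1 PySem.Dict.empty
        [("tone", pyRstripChars (a.getD "tone" "") "," ++ " yet " ++
                  pyLstripChars (PySem.Str.lower (b.getD "tone" "")) "a "),
         ("design", a.getD "design" "" ++ ", blended with " ++ b.getD "design" "")]

-- ===== PORT B =====
def blend_alt (cat_a cat_b : String) : List (String × String) :=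
  let a := STYLE_PROMPTS.getD cat_a PySem.Dict.empty
  let b := STYLE_PROMPTS.getD cat_b PySem.Dict.empty
  [("tone", pyRstripChars (a.getD "tone" "") "," ++ " yet " ++
            pyLstripChars (PySem.Str.lower (b.getD "tone" "")) "a "),
   ("design", a.getD "design" "" ++ ", blended with " ++ b.getD "design" "")]

def resolve_style_alt (vibes : List String) : List (String × String) :=
  if vibes = [] then (STYLE_PROMPTS.getD "energetic_cute" PySem.Dict.empty).items
  else
    let cats := vibes.map (fun v => VIBE_STYLE.getD v "energetic_cute")
    let order := PySem.List.dedup cats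
    let m := PySem.List.maxD (order.map (fun c => PySem.List.count cats c)) (fun x => x) 0
    let top := order.filter (fun c => PySem.List.count cats c == m)
    match top with
    | [c] => (STYLE_PROMPTS.getD c PySem.Dict.empty).items
    | c0 :: c1 :: _ => blend_alt c0 c1
    | [] => []   -- unreachable: vibes ≠ [] makes `top` nonempty

-- ===== PRECONDITION & SPEC =====
def Spec_resolve_style (vibes : List String) (out : List (String × String)) : Prop := out = resolve_style_alt vibes
instance (vibes : List String) (out : List (String × String)) : Decidable (Spec_resolve_style vibes out) := by unfold Spec_resolve_style; infer_instance

-- ===== CLAIM (what is proved, stated in full; the proofs are below) =====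
def Claim_equal_resolve_style : Prop := ∀ (vibes : List String), Dom_resolve_style vibes → Spec_resolve_style vibes (resolve_style vibes)

-- ===== LEMMAS AND PROOFS =====

-- the counting loop of A is Counter(cats) over the mapped category list
theorem countsA (vibes : List String) :
    vibes.foldl (fun d v =>
      let cat := VIBE_STYLE.getD v "energetic_cute"
      (d.insert cat (d.getD cat 0 + 1) : PySem.Dict String Int)) PySem.Dict.empty
    = PySem.Dict.counter (vibes.map fun v => VIBE_STYLE.getD v "energetic_cute") := by
  rw [← PySem.Dict.foldl_insert_getD_add_one_eq_counter, List.foldl_map]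

-- every category VIBE_STYLE yields is one of the three style keys
theorem cat_mem (v : String) :
    VIBE_STYLE.getD v "energetic_cute" ∈ (["soft_cute", "energetic_cute", "cool"] : List String) := by
  have h : VIBE_STYLE = PySem.Dict.mk
      [("fuwafuwa", "soft_cute"), ("nikoniko", "soft_cute"), ("pokapoka", "soft_cute"),
       ("tekipaki", "energetic_cute"), ("kirakira", "energetic_cute"), ("wakuwaku", "energetic_cute"),
       ("kiri", "cool"), ("shu", "cool"), ("meramera", "cool")] := by decide
  rw [h]
  simp only [PySem.Dict.getD_eq_get?_getD, PySem.Dict.get?_mk_cons]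
  split_ifs <;> simp [PySem.Dict.get?, PySem.Dict.empty]

-- the category-selection step: stable descending sort + top-two inspection (A) equals
-- max-count filter in first-occurrence order (B), for any ≤ 3 distinct categories
set_option maxHeartbeats 1000000 in
theorem select (order : List String) (cnt : String → Nat) (hlen : order.length ≤ 3) :
  (match PySem.List.sorted (order.map fun k => (k, (cnt k : Int))) (fun x => -x.2) false with
   | [] => ([] : List (String × String))
   | [(c0, _)] => (STYLE_PROMPTS.getD c0 PySem.Dict.empty).items
   | (c0, n0) :: (c1, n1) :: _ =>
     if n0 > n1 then (STYLE_PROMPTS.getD c0 PySem.Dict.empty).items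
     else blend_alt c0 c1)
  = match order.filter (fun c => cnt c == PySem.List.maxD (order.map fun c => cnt c) (fun x => x) 0) with
    | [c] => (STYLE_PROMPTS.getD c PySem.Dict.empty).items
    | c0 :: c1 :: _ => blend_alt c0 c1
    | [] => [] := by
  rcases order with _ | ⟨a, _ | ⟨b, _ | ⟨c, _ | ⟨d, t⟩⟩⟩⟩
  · rfl
  · simp [PySem.List.sorted, PySem.List.insertBy, PySem.List.maxD, PySem.List.max?]
  · simp only [List.map, PySem.List.maxD, PySem.List.max?_id_cons, Option.getD_some, List.foldl,
        PySem.List.sorted, PySem.List.insertBy, List.filter_cons, List.filter_nil, if_false,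
        beq_iff_eq, decide_eq_true_eq, neg_lt_neg_iff, Nat.cast_lt, gt_iff_lt, Bool.false_eq_true]
    split_ifs <;>
        (try simp only [List.map, PySem.List.maxD, PySem.List.max?_id_cons, Option.getD_some, List.foldl,
        PySem.List.sorted, PySem.List.insertBy, List.filter_cons, List.filter_nil, if_false,
        beq_iff_eq, decide_eq_true_eq, neg_lt_neg_iff, Nat.cast_lt, gt_iff_lt, Bool.false_eq_true]) <;>
        (try split_ifs) <;>
        (try simp only [List.map, PySem.List.maxD, PySem.List.max?_id_cons, Option.getD_some, List.foldl,
        PySem.List.sorted, PySem.List.insertBy, List.filter_cons, List.filter_nil, if_false,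
        beq_iff_eq, decide_eq_true_eq, neg_lt_neg_iff, Nat.cast_lt, gt_iff_lt, Bool.false_eq_true]) <;>
        (try split_ifs) <;>
      first | omega | rfl | exact (‹False›).elim
  · simp only [List.map, PySem.List.maxD, PySem.List.max?_id_cons, Option.getD_some, List.foldl,
        PySem.List.sorted, PySem.List.insertBy, List.filter_cons, List.filter_nil, if_false,
        beq_iff_eq, decide_eq_true_eq, neg_lt_neg_iff, Nat.cast_lt, gt_iff_lt, Bool.false_eq_true]
    split_ifs <;>
        (try simp only [List.map, PySem.List.maxD, PySem.List.max?_id_cons, Option.getD_some, List.foldl,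
        PySem.List.sorted, PySem.List.insertBy, List.filter_cons, List.filter_nil, if_false,
        beq_iff_eq, decide_eq_true_eq, neg_lt_neg_iff, Nat.cast_lt, gt_iff_lt, Bool.false_eq_true]) <;>
        (try split_ifs) <;>
        (try simp only [List.map, PySem.List.maxD, PySem.List.max?_id_cons, Option.getD_some, List.foldl,
        PySem.List.sorted, PySem.List.insertBy, List.filter_cons, List.filter_nil, if_false,
        beq_iff_eq, decide_eq_true_eq, neg_lt_neg_iff, Nat.cast_lt, gt_iff_lt, Bool.false_eq_true]) <;>
        (try split_ifs) <;>
      first | omega | rfl | exact (‹False›).elim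
  · simp at hlen; omega

theorem resolve_style_eq_alt (vibes : List String) :
    resolve_style vibes = resolve_style_alt vibes := by
  by_cases hne : vibes = []
  · subst hne; rfl
  · unfold resolve_style resolve_style_alt
    simp only [if_neg hne]
    rw [countsA, PySem.Dict.items_counter]
    simp only [PySem.List.dedup_eq_ofList, PySem.List.count_eq]
    have hsub : (PySem.Set.ofList (vibes.map fun v => VIBE_STYLE.getD v "energetic_cute"))
        ⊆ (["soft_cute", "energetic_cute", "cool"] : List String) := by
      intro x hx
      rw [PySem.Set.mem_ofList] at hx
      obtain ⟨v, _, rfl⟩ := List.mem_map.mp hx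
      exact cat_mem v
    have hlen : (PySem.Set.ofList (vibes.map fun v => VIBE_STYLE.getD v "energetic_cute")).length ≤ 3 :=
      ((PySem.Set.nodup_ofList _).subperm hsub).length_le
    exact select _ (fun c => (vibes.map fun v => VIBE_STYLE.getD v "energetic_cute").count c) hlen

-- ===== VERDICT (by name: the statement is the Claim_ definition above) =====
theorem resolve_style_spec : Claim_equal_resolve_style := by
  intro vibes _
  unfold Spec_resolve_style
  exact resolve_style_eq_alt vibes
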